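-- pv_equiv track=rewrite | github.com/Joseda8/profiler | test_cases/projects/energy_consumption/scenarios/threads_numerical/1/matmul.py | compute_checksum_for_row_slice
-- ===== SOURCE A (Python) =====
-- from typing import Iterable, List
--
-- def compute_checksum_for_row_slice(
--     start_row_index: int,
--     end_row_index: int,
--     left_matrix: List[List[int]],
--     right_matrix_transposed: List[List[int]],
-- ) -> int:
--     """
--     Multiply the specified slice of rows of the left matrix by the right matrix (already transposed)
--     and return the checksum of all resulting cells.
--     """
--     checksum = 0
--     for row_index in range(start_row_index, end_row_index):
--         row_values = left_matrix[row_index]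
--         for column_values in right_matrix_transposed:
--             cell_value = sum(left_value * right_value for left_value, right_value in zip(row_values, column_values))
--             checksum += cell_value
--     return checksum
-- ===== SOURCE B (Python) =====
-- from typing import List
--
-- def compute_checksum_for_row_slice(
--     start_row_index: int,
--     end_row_index: int,
--     left_matrix: List[List[int]],
--     right_matrix_transposed: List[List[int]],
-- ) -> int:
--     # Factor the double sum: checksum = sum_k rowsum[k] * colsum[k],
--     # treating rows/columns as zero-padded to the common width.
--     rows = [left_matrix[i] for i in range(start_row_index, end_row_index)]
--     width = max((len(r) for r in rows + right_matrix_transposed), default=0)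
--     row_sums = [sum(r[k] for r in rows if k < len(r)) for k in range(width)]
--     col_sums = [sum(c[k] for c in right_matrix_transposed if k < len(c)) for k in range(width)]
--     return sum(a * b for a, b in zip(row_sums, col_sums))
-- ===== Notes on version B (the rewrite author's own statement) =====
-- stated objective: alternative
-- what changed: Replaces the triple loop over rows x columns x entries by factoring the checksum: per-position row-sums and column-sums (zero-padded to the common width) are built once and the result is their dot product.
import Mathlib
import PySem

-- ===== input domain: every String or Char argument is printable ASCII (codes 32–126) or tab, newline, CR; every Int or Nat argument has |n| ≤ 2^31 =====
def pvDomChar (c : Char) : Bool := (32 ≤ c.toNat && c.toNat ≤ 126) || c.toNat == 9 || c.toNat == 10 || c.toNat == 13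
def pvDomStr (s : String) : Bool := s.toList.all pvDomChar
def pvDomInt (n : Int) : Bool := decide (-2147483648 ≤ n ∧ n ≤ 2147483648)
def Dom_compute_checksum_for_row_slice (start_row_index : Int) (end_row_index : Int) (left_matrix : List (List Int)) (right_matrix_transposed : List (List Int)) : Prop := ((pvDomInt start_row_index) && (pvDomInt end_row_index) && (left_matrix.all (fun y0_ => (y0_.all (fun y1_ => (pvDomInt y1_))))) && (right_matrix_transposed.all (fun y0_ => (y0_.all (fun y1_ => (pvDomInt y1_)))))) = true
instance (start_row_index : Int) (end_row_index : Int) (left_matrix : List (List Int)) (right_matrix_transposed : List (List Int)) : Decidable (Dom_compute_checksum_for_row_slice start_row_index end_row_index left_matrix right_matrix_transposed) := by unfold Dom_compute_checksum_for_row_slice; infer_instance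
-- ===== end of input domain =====

-- B factors the row×column double sum into a dot product of per-position row-sums and column-sums (a different algorithm; not measured faster on the probe's inputs).

-- ===== PORT A =====
-- A's inner generator: sum(l*r for l, r in zip(row, col))
def pvDotA (r c : List Int) : Int :=
  ((r.zip c).map (fun p => p.1 * p.2)).sum

def compute_checksum_for_row_slice (start_row_index : Int) (end_row_index : Int) (left_matrix : List (List Int)) (right_matrix_transposed : List (List Int)) : Int :=
  (PySem.List.pyRange start_row_index end_row_index 1).foldl (fun checksum row_index =>
    let row_values := (PySem.List.pyGet? left_matrix row_index).getD []   -- none = IndexError, excluded by Pre_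
    right_matrix_transposed.foldl (fun acc column_values => acc + pvDotA row_values column_values) checksum) 0

-- ===== PORT B =====
def compute_checksum_for_row_slice_alt (start_row_index : Int) (end_row_index : Int) (left_matrix : List (List Int)) (right_matrix_transposed : List (List Int)) : Int :=
  let rows := (PySem.List.pyRange start_row_index end_row_index 1).map
      (fun i => (PySem.List.pyGet? left_matrix i).getD [])   -- none = IndexError, excluded by Pre_
  let width := ((rows ++ right_matrix_transposed).map List.length).foldl max 0
  let row_sums := (List.range width).map (fun k => (rows.map (fun r => r.getD k 0)).sum)
  let col_sums := (List.range width).map (fun k => (right_matrix_transposed.map (fun c => c.getD k 0)).sum)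
  ((row_sums.zip col_sums).map (fun p => p.1 * p.2)).sum

-- ===== PRECONDITION & SPEC =====
-- Pre_ excludes exactly the inputs where Python A raises IndexError: some index in
-- range(start, end) is outside the valid (negative-wraparound) index range of left_matrix.
def Pre_compute_checksum_for_row_slice (start_row_index : Int) (end_row_index : Int) (left_matrix : List (List Int)) (right_matrix_transposed : List (List Int)) : Prop :=
  end_row_index ≤ start_row_index ∨
    (-(left_matrix.length : Int) ≤ start_row_index ∧ end_row_index ≤ (left_matrix.length : Int))
instance (start_row_index : Int) (end_row_index : Int) (left_matrix : List (List Int)) (right_matrix_transposed : List (List Int)) : Decidable (Pre_compute_checksum_for_row_slice start_row_index end_row_index left_matrix right_matrix_transposed) := by unfold Pre_compute_checksum_for_row_slice; infer_instance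

def pvWitness_compute_checksum_for_row_slice : Int × Int × List (List Int) × List (List Int) :=
  (0, 2, [[1, 2], [3]], [[1, 1], [2]])

def Spec_compute_checksum_for_row_slice (start_row_index : Int) (end_row_index : Int) (left_matrix : List (List Int)) (right_matrix_transposed : List (List Int)) (out : Int) : Prop := out = compute_checksum_for_row_slice_alt start_row_index end_row_index left_matrix right_matrix_transposed
instance (start_row_index : Int) (end_row_index : Int) (left_matrix : List (List Int)) (right_matrix_transposed : List (List Int)) (out : Int) : Decidable (Spec_compute_checksum_for_row_slice start_row_index end_row_index left_matrix right_matrix_transposed out) := by unfold Spec_compute_checksum_for_row_slice; infer_instance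

-- ===== CLAIM (what is proved, stated in full; the proofs are below) =====
def Claim_equal_compute_checksum_for_row_slice : Prop := ∀ (start_row_index : Int) (end_row_index : Int) (left_matrix : List (List Int)) (right_matrix_transposed : List (List Int)), Dom_compute_checksum_for_row_slice start_row_index end_row_index left_matrix right_matrix_transposed → Pre_compute_checksum_for_row_slice start_row_index end_row_index left_matrix right_matrix_transposed → Spec_compute_checksum_for_row_slice start_row_index end_row_index left_matrix right_matrix_transposed (compute_checksum_for_row_slice start_row_index end_row_index left_matrix right_matrix_transposed)

-- ===== LEMMAS AND PROOFS =====

-- zip-dot equals the K-padded pointwise-product sum once K bounds both lengths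
theorem pvDot_eq_padded (r c : List Int) (K : Nat) (hr : r.length ≤ K) (hc : c.length ≤ K) :
    pvDotA r c = ∑ k ∈ Finset.range K, r.getD k 0 * c.getD k 0 := by
  induction r generalizing c K with
  | nil =>
    simp [pvDotA]
  | cons a r ih =>
    cases c with
    | nil => simp [pvDotA]
    | cons b c =>
      cases K with
      | zero => simp at hr
      | succ K =>
        rw [Finset.sum_range_succ']
        simp only [List.getD_cons_succ, List.getD_cons_zero]
        have h := ih c K (by simpa using hr) (by simpa using hc)
        simp only [pvDotA, List.zip_cons_cons, List.map_cons, List.sum_cons] at h ⊢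
        rw [h]; ring

-- swap a list-sum of range-sums
theorem pvSum_swap {α : Type} (l : List α) (K : Nat) (f : α → Nat → Int) :
    (l.map (fun r => ∑ k ∈ Finset.range K, f r k)).sum
      = ∑ k ∈ Finset.range K, (l.map (fun r => f r k)).sum := by
  induction l with
  | nil => simp
  | cons a l ih => simp [ih, Finset.sum_add_distrib]

-- every element's length is bounded by the foldl-max of the lengths
theorem pvInit_le_foldl_max (l : List Nat) (a : Nat) : a ≤ l.foldl max a := by
  induction l generalizing a with
  | nil => simp
  | cons b l ih => exact le_trans (le_max_left a b) (ih (max a b))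

theorem pvLe_foldl_max (l : List Nat) (a : Nat) (x : Nat) (hx : x ∈ l) : x ≤ l.foldl max a := by
  induction l generalizing a with
  | nil => simp at hx
  | cons b l ih =>
    rcases List.mem_cons.mp hx with h | h
    · subst h; exact le_trans (le_max_right a x) (pvInit_le_foldl_max l (max a x))
    · exact ih _ h

theorem pvFoldl_add_eq_sum {α : Type} (l : List α) (f : α → Int) (a : Int) :
    l.foldl (fun s x => s + f x) a = a + (l.map f).sum := by
  induction l generalizing a with
  | nil => simp
  | cons b l ih => simp [ih]; ring

theorem pvSum_list_range (K : Nat) (f : Nat → Int) :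
    ((List.range K).map f).sum = ∑ k ∈ Finset.range K, f k := by
  induction K with
  | zero => simp
  | succ K ih => simp [List.range_succ, Finset.sum_range_succ, ih]

theorem pvSum_range_eq (K : Nat) (f g : Nat → Int) :
    ((((List.range K).map f).zip ((List.range K).map g)).map (fun p => p.1 * p.2)).sum
      = ∑ k ∈ Finset.range K, f k * g k := by
  rw [List.zip_map', List.map_map]
  simpa [Function.comp] using pvSum_list_range K (fun k => f k * g k)

theorem pvFoldl_foldl_eq_sum (l : List Int) (R : List (List Int)) (row : Int → List Int) :
    l.foldl (fun checksum i => R.foldl (fun acc c => acc + pvDotA (row i) c) checksum) 0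
      = (l.map (fun i => (R.map (fun c => pvDotA (row i) c)).sum)).sum := by
  have hb : (fun checksum i => R.foldl (fun acc c => acc + pvDotA (row i) c) checksum)
      = fun checksum i => checksum + (R.map (fun c => pvDotA (row i) c)).sum := by
    funext a i; exact pvFoldl_add_eq_sum R _ a
  rw [hb, pvFoldl_add_eq_sum]; rw [zero_add]

-- ===== VERDICT (by name: the statement is the Claim_ definition above) =====
theorem compute_checksum_for_row_slice_spec : Claim_equal_compute_checksum_for_row_slice := by
  intro s e L R _ _
  unfold Spec_compute_checksum_for_row_slice
  unfold compute_checksum_for_row_slice compute_checksum_for_row_slice_alt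
  set idx := PySem.List.pyRange s e 1 with hidx
  set row : Int → List Int := fun i => (PySem.List.pyGet? L i).getD [] with hrow
  set rows : List (List Int) := idx.map row with hrows
  set K : Nat := ((rows ++ R).map List.length).foldl max 0 with hK
  have hlen : ∀ x ∈ rows ++ R, x.length ≤ K := by
    intro x hx
    exact pvLe_foldl_max _ 0 _ (List.mem_map_of_mem hx)
  rw [pvFoldl_foldl_eq_sum idx R row, pvSum_range_eq]
  have hfold : (List.map (fun i => (List.map (fun c => pvDotA (row i) c) R).sum) idx)
      = rows.map (fun r => (R.map (fun c => pvDotA r c)).sum) := by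
    rw [hrows, List.map_map]; rfl
  rw [hfold, ← hK]
  calc (rows.map (fun r => (R.map (fun c => pvDotA r c)).sum)).sum
      = (rows.map (fun r => ∑ k ∈ Finset.range K,
            r.getD k 0 * (R.map (fun c => c.getD k 0)).sum)).sum := by
        apply congrArg List.sum
        apply List.map_congr_left
        intro r hr
        have h1 : (R.map (fun c => pvDotA r c))
            = R.map (fun c => ∑ k ∈ Finset.range K, r.getD k 0 * c.getD k 0) := by
          apply List.map_congr_left
          intro c hc
          exact pvDot_eq_padded r c K (hlen r (List.mem_append_left _ hr))
            (hlen c (List.mem_append_right _ hc))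
        rw [h1, pvSum_swap]
        exact Finset.sum_congr rfl
          (fun k _ => List.sum_map_mul_left R (fun c => c.getD k 0) (r.getD k 0))
    _ = ∑ k ∈ Finset.range K,
          (rows.map (fun r => r.getD k 0)).sum * (R.map (fun c => c.getD k 0)).sum := by
        rw [pvSum_swap]
        exact Finset.sum_congr rfl
          (fun k _ => List.sum_map_mul_right rows (fun r => r.getD k 0) _)
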